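-- pv_equiv track=rewrite | github.com/cclarktcp/dynafunc | dynafunc/builder/util.py | _remove_sig_specific_co_flags
-- ===== SOURCE A (Python) =====
-- CODE_FLAGS_MAP = {
--     "CO_OPTIMIZED": 1,
--     "CO_NEWLOCALS": 2,
--     "CO_VARARGS": 4,
--     "CO_VARKEYWORDS": 8,
--     "CO_NESTED": 16,
--     "CO_GENERATOR": 32,
--     "CO_NOFREE": 64,
--     "CO_COROUTINE": 128,
--     "CO_ITERABLE_COROUTINE": 256,
--     "CO_ASYNC_GENERATOR": 512
-- }
--
-- def code_flags_to_bitmap(co_flags):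
--     bitmap = dict()
--     for flag, num in CODE_FLAGS_MAP.items():
--         bitmap[flag] = bool(co_flags & num)
--     return bitmap
--
-- def bitmap_to_code_flags(bitmap):
--     co_flags = 0
--     for k,v in bitmap.items():
--         if bool(v):
--             num = CODE_FLAGS_MAP.get(k)
--         else:
--             num = 0
--         co_flags |= num
--     return co_flags
--
-- def _remove_sig_specific_co_flags(co_flags):
--     todel = [
--         "CO_VARARGS",
--         "CO_VARKEYWORDS",
--     ]
--     bitmap = code_flags_to_bitmap(co_flags)
--     for key in todel:
--         if key in bitmap:
--             bitmap[key] = False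
--
--     return bitmap_to_code_flags(bitmap)
-- ===== SOURCE B (Python) =====
-- CODE_FLAGS_MAP = {
--     "CO_OPTIMIZED": 1,
--     "CO_NEWLOCALS": 2,
--     "CO_VARARGS": 4,
--     "CO_VARKEYWORDS": 8,
--     "CO_NESTED": 16,
--     "CO_GENERATOR": 32,
--     "CO_NOFREE": 64,
--     "CO_COROUTINE": 128,
--     "CO_ITERABLE_COROUTINE": 256,
--     "CO_ASYNC_GENERATOR": 512
-- }
--
--
-- def _remove_sig_specific_co_flags(co_flags):
--     keep = 0
--     for flag, num in CODE_FLAGS_MAP.items():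
--         if flag not in ("CO_VARARGS", "CO_VARKEYWORDS"):
--             keep |= num
--     return co_flags & keep
-- ===== Notes on version B (the rewrite author's own statement) =====
-- stated objective: simpler
-- what changed: Replaces the dict round-trip (flags->bool bitmap->flags) with a single pass that ORs the non-signature flag bits into a keep-mask and returns co_flags AND keep-mask.
import Mathlib
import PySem

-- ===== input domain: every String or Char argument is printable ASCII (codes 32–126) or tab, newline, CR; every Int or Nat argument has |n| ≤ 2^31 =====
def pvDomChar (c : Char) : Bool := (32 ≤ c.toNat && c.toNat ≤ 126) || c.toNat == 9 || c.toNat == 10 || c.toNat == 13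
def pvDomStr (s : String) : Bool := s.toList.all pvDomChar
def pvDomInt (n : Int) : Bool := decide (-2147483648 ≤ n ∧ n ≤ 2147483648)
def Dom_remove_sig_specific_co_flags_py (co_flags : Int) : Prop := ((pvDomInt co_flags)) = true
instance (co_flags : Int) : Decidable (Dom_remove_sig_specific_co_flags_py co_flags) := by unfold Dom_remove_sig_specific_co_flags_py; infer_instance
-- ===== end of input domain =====

set_option maxRecDepth 16384


-- B replaces A's dict round-trip by ORing the kept flag bits into one mask and ANDing it with co_flags (simpler; same result).

-- ===== PORT A =====
def pyCODE_FLAGS_MAP : PySem.Dict String Int :=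
  PySem.Dict.ofList [("CO_OPTIMIZED",1),("CO_NEWLOCALS",2),("CO_VARARGS",4),("CO_VARKEYWORDS",8),("CO_NESTED",16),("CO_GENERATOR",32),("CO_NOFREE",64),("CO_COROUTINE",128),("CO_ITERABLE_COROUTINE",256),("CO_ASYNC_GENERATOR",512)]

def code_flags_to_bitmap (co_flags : Int) : PySem.Dict String Bool :=
  pyCODE_FLAGS_MAP.items.foldl (fun bitmap fn => bitmap.insert fn.1 (PySem.Int.band co_flags fn.2 != 0)) PySem.Dict.empty

-- `num = CODE_FLAGS_MAP.get(k)` can be None in Python, on which `|=` would raise; every key fed to it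
-- comes from CODE_FLAGS_MAP itself, so the lookup always succeeds and `.getD 0` is exact here.
def bitmap_to_code_flags (bitmap : PySem.Dict String Bool) : Int :=
  bitmap.items.foldl (fun co kv =>
    PySem.Int.bor co (if kv.2 then (pyCODE_FLAGS_MAP.get? kv.1).getD 0 else 0)) 0

def remove_sig_specific_co_flags_py (co_flags : Int) : Int :=
  let todel := ["CO_VARARGS", "CO_VARKEYWORDS"]
  let bitmap := code_flags_to_bitmap co_flags
  let bitmap2 := todel.foldl (fun bm key => if bm.contains key then bm.insert key false else bm) bitmap
  bitmap_to_code_flags bitmap2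

-- ===== PORT B =====
def remove_sig_specific_co_flags_py_alt (co_flags : Int) : Int :=
  let keep := pyCODE_FLAGS_MAP.items.foldl
    (fun keep fn => if fn.1 != "CO_VARARGS" && fn.1 != "CO_VARKEYWORDS" then PySem.Int.bor keep fn.2 else keep) 0
  PySem.Int.band co_flags keep

-- ===== PRECONDITION & SPEC =====
def Spec_remove_sig_specific_co_flags_py (co_flags : Int) (out : Int) : Prop := out = remove_sig_specific_co_flags_py_alt co_flags
instance (co_flags : Int) (out : Int) : Decidable (Spec_remove_sig_specific_co_flags_py co_flags out) := by unfold Spec_remove_sig_specific_co_flags_py; infer_instance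

-- ===== CLAIM (what is proved, stated in full; the proofs are below) =====
def Claim_equal_remove_sig_specific_co_flags_py : Prop := ∀ (co_flags : Int), Dom_remove_sig_specific_co_flags_py co_flags → Spec_remove_sig_specific_co_flags_py co_flags (remove_sig_specific_co_flags_py co_flags)

-- ===== LEMMAS AND PROOFS =====

-- low 10 bits of (1024*q + r) are those of r
theorem pv_nat_local (q r t : Nat) (hr : r < 1024) (ht : t < 1024) :
    (1024 * q + r) &&& t = r &&& t := by
  apply Nat.eq_of_testBit_eq; intro k
  rw [Nat.testBit_land, Nat.testBit_land]
  by_cases hk : k < 10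
  · have h : (2 ^ 10 * q + r).testBit k = if k < 10 then r.testBit k else q.testBit (k - 10) :=
      Nat.testBit_two_pow_mul_add q (show r < 2 ^ 10 by omega) k
    rw [show (1024 : Nat) * q = 2 ^ 10 * q by norm_num, h, if_pos hk]
  · have h1024 : (1024 : Nat) ≤ 2 ^ k := by
      calc (1024 : Nat) = 2 ^ 10 := by norm_num
        _ ≤ 2 ^ k := Nat.pow_le_pow_right (by norm_num) (by omega)
    have ht' : t.testBit k = false := Nat.testBit_lt_two_pow (lt_of_lt_of_le ht h1024)
    simp [ht']

theorem pv_nat_local' (t q r : Nat) (hr : r < 1024) (ht : t < 1024) :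
    t &&& (1024 * q + r) = t &&& r := by
  rw [Nat.land_comm, pv_nat_local q r t hr ht, Nat.land_comm]

-- band with a value below 1024 only reads the low 10 bits
theorem pv_band_low (a n : Int) (h0 : 0 ≤ n) (hn : n < 1024)
    (hsub : ∀ r : Nat, r < 1024 → n.toNat - (n.toNat &&& (1023 - r)) = r &&& n.toNat) :
    PySem.Int.band a n = PySem.Int.band (a % 1024) n := by
  have hq : 1024 * (a / 1024) + a % 1024 = a := Int.mul_ediv_add_emod a 1024
  have hr0 : 0 ≤ a % 1024 := Int.emod_nonneg a (by norm_num)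
  have hr1 : a % 1024 < 1024 := Int.emod_lt_of_pos a (by norm_num)
  unfold PySem.Int.band
  by_cases ha : 0 ≤ a
  · rw [if_pos ha, if_pos h0, if_pos hr0, if_pos h0]
    have hsplit : a.toNat = 1024 * (a / 1024).toNat + (a % 1024).toNat := by omega
    rw [hsplit, pv_nat_local _ _ _ (by omega) (by omega)]
  · rw [if_neg ha, if_pos h0, if_pos hr0, if_pos h0]
    have hsplit : (-a - 1).toNat = 1024 * (-(a / 1024) - 1).toNat + (1023 - (a % 1024).toNat) := by omega
    rw [hsplit, pv_nat_local' _ _ _ (by omega) (by omega),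
        hsub (a % 1024).toNat (by omega), Nat.land_comm]

-- the literal flags dict as a Dict.mk
theorem pv_map_eq : pyCODE_FLAGS_MAP = PySem.Dict.mk
    [("CO_OPTIMIZED",1),("CO_NEWLOCALS",2),("CO_VARARGS",4),("CO_VARKEYWORDS",8),("CO_NESTED",16),("CO_GENERATOR",32),("CO_NOFREE",64),("CO_COROUTINE",128),("CO_ITERABLE_COROUTINE",256),("CO_ASYNC_GENERATOR",512)] := by decide

theorem pv_bm_closed (a : Int) : code_flags_to_bitmap a = PySem.Dict.mk
    [("CO_OPTIMIZED", PySem.Int.band a 1 != 0), ("CO_NEWLOCALS", PySem.Int.band a 2 != 0),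
     ("CO_VARARGS", PySem.Int.band a 4 != 0), ("CO_VARKEYWORDS", PySem.Int.band a 8 != 0),
     ("CO_NESTED", PySem.Int.band a 16 != 0), ("CO_GENERATOR", PySem.Int.band a 32 != 0),
     ("CO_NOFREE", PySem.Int.band a 64 != 0), ("CO_COROUTINE", PySem.Int.band a 128 != 0),
     ("CO_ITERABLE_COROUTINE", PySem.Int.band a 256 != 0), ("CO_ASYNC_GENERATOR", PySem.Int.band a 512 != 0)] := by
  apply PySem.Dict.ext
  unfold code_flags_to_bitmap
  rw [PySem.Dict.items_foldl_insert_fresh _ _ _ _ (by decide) (by decide)]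
  rfl

-- A evaluated to a chain of bit tests
def pvChain (a : Int) : Int :=
  PySem.Int.bor
    (PySem.Int.bor
      (PySem.Int.bor
        (PySem.Int.bor
          (PySem.Int.bor
            (PySem.Int.bor
              (PySem.Int.bor (PySem.Int.bor 0 (if PySem.Int.band a 1 = 0 then 0 else 1))
                (if PySem.Int.band a 2 = 0 then 0 else 2))
              (if PySem.Int.band a 16 = 0 then 0 else 16))
            (if PySem.Int.band a 32 = 0 then 0 else 32))
          (if PySem.Int.band a 64 = 0 then 0 else 64))
        (if PySem.Int.band a 128 = 0 then 0 else 128))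
      (if PySem.Int.band a 256 = 0 then 0 else 256))
    (if PySem.Int.band a 512 = 0 then 0 else 512)

theorem pv_A_closed (a : Int) : remove_sig_specific_co_flags_py a = pvChain a := by
  unfold remove_sig_specific_co_flags_py bitmap_to_code_flags pvChain
  rw [pv_bm_closed]
  simp [List.foldl, PySem.Dict.contains_insert, PySem.Dict.contains_mk, PySem.Dict.items_insert,
    pv_map_eq, PySem.Dict.get?_mk_cons]

theorem pv_alt_eq (a : Int) : remove_sig_specific_co_flags_py_alt a = PySem.Int.band a 1011 := rfl

theorem pv_core : ∀ m : Fin 1024, pvChain ((m : Nat) : Int) = PySem.Int.band ((m : Nat) : Int) 1011 := by decide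

-- ===== VERDICT (by name: the statement is the Claim_ definition above) =====
theorem remove_sig_specific_co_flags_py_spec : Claim_equal_remove_sig_specific_co_flags_py := by
  intro a _
  unfold Spec_remove_sig_specific_co_flags_py
  have hr0 : 0 ≤ a % 1024 := Int.emod_nonneg a (by norm_num)
  have hr1 : a % 1024 < 1024 := Int.emod_lt_of_pos a (by norm_num)
  have hcast : a % 1024 = (((a % 1024).toNat : Nat) : Int) := by omega
  have hchain : pvChain a = pvChain (a % 1024) := by
    unfold pvChain
    rw [pv_band_low a 1 (by norm_num) (by norm_num) (by decide),
        pv_band_low a 2 (by norm_num) (by norm_num) (by decide),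
        pv_band_low a 16 (by norm_num) (by norm_num) (by decide),
        pv_band_low a 32 (by norm_num) (by norm_num) (by decide),
        pv_band_low a 64 (by norm_num) (by norm_num) (by decide),
        pv_band_low a 128 (by norm_num) (by norm_num) (by decide),
        pv_band_low a 256 (by norm_num) (by norm_num) (by decide),
        pv_band_low a 512 (by norm_num) (by norm_num) (by decide)]
  calc remove_sig_specific_co_flags_py a = pvChain a := pv_A_closed a
    _ = pvChain (a % 1024) := hchain
    _ = PySem.Int.band (a % 1024) 1011 := by
          rw [hcast]; exact pv_core ⟨(a % 1024).toNat, by omega⟩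
    _ = PySem.Int.band a 1011 := (pv_band_low a 1011 (by norm_num) (by norm_num) (by decide)).symm
    _ = remove_sig_specific_co_flags_py_alt a := (pv_alt_eq a).symm
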